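-- pv_equiv track=rewrite | github.com/copernicus99/Tile-Sorter-Thinger | solver/orchestrator.py | _mirrored_probe_order
-- ===== SOURCE A (Python) =====
-- from typing import Dict, List, Tuple, Optional, Any, Iterable, Set
--
-- def _mirrored_probe_order(values: List[int]) -> List[int]:
--     """Return a high/low interleaving (pop-in/out) ordering.
--
--     Phase D is meant to “fit tiles to a 10×10 grid,” so we start from the base
--     grid (the largest candidate) and then mirror probes toward the smaller
--     boards.  This alternates popping from the high and low ends of the sorted
--     sequence to avoid biasing the search toward only shrinking or only growing
--     boards.
--     """
--
--     if not values:
--         return []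
--
--     ordered: List[int] = []
--     lo = 0
--     hi = len(values) - 1
--     while hi >= lo:
--         ordered.append(values[hi])
--         if hi == lo:
--             break
--         ordered.append(values[lo])
--         hi -= 1
--         lo += 1
--     return ordered
-- ===== SOURCE B (Python) =====
-- from typing import List
--
-- def _mirrored_probe_order(values: List[int]) -> List[int]:
--     result: List[int] = []
--     for hi, lo in zip(values[::-1], values):
--         result.append(hi)
--         result.append(lo)
--     return result[:len(values)]
-- ===== Notes on version B (the rewrite author's own statement) =====
-- stated objective: idiomatic
-- what changed: Replaces A's two-pointer while-loop with early break by a build-everything-then-truncate shape: zip the reversed list with the original, flatten the (high, low) pairs, and slice to the original length.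
import Mathlib
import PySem

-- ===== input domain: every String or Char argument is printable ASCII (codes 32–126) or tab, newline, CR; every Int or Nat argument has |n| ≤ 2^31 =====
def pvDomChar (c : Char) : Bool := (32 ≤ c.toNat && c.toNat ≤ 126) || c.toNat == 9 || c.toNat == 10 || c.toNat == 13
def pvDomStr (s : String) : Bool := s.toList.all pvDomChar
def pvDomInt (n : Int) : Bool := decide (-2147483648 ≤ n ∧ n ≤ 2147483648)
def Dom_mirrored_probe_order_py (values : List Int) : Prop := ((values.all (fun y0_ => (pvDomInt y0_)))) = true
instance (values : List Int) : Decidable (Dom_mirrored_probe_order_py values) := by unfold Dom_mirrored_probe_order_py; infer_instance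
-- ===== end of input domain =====

-- B replaces A's two-pointer while-loop (with early break) by zipping the reversed list
-- with the original, flattening the (high, low) pairs and truncating to the input length
-- (objective: idiomatic).

-- ===== PORT A =====
-- A's while-loop; the invariant lo ≤ hi < values.length holds at every index access,
-- so values[hi] / values[lo] are ported with getD (always in range where evaluated).
def mporderLoop (values : List Int) (lo hi : Nat) : List Int :=
  if _h : lo ≤ hi then
    if _h2 : hi = lo then [values.getD hi 0]
    else values.getD hi 0 :: values.getD lo 0 :: mporderLoop values (lo + 1) (hi - 1)
  else []
termination_by hi + 1 - lo
decreasing_by omega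

def mirrored_probe_order_py (values : List Int) : List Int :=
  if values = [] then [] else mporderLoop values 0 (values.length - 1)

-- ===== PORT B =====
def mirrored_probe_order_py_alt (values : List Int) : List Int :=
  ((values.reverse.zip values).flatMap (fun p => [p.1, p.2])).take values.length

-- ===== PRECONDITION & SPEC =====
def Spec_mirrored_probe_order_py (values : List Int) (out : List Int) : Prop := out = mirrored_probe_order_py_alt values
instance (values : List Int) (out : List Int) : Decidable (Spec_mirrored_probe_order_py values out) := by unfold Spec_mirrored_probe_order_py; infer_instance

-- ===== CLAIM (what is proved, stated in full; the proofs are below) =====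
def Claim_equal_mirrored_probe_order_py : Prop := ∀ (values : List Int), Dom_mirrored_probe_order_py values → Spec_mirrored_probe_order_py values (mirrored_probe_order_py values)

-- ===== LEMMAS AND PROOFS =====

-- canonical "mirror" of a whole segment: last, first, then recurse on the interior
def pvMix : List Int → List Int
  | [] => []
  | [a] => [a]
  | a :: b :: rest =>
      (b :: rest).getLast (by simp) :: a :: pvMix ((b :: rest).dropLast)
termination_by xs => xs.length
decreasing_by simp

lemma pvMix_concat (a b : Int) (m : List Int) :
    pvMix (a :: (m ++ [b])) = b :: a :: pvMix m := by
  cases m with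
  | nil => simp [pvMix]
  | cons c t =>
    show pvMix (a :: c :: (t ++ [b])) = _
    rw [pvMix]
    have h1 : (c :: (t ++ [b])).getLast (by simp) = b := by
      show ((c :: t) ++ [b]).getLast (by simp) = b
      exact List.getLast_concat
    have h2 : (c :: (t ++ [b])).dropLast = c :: t := by
      show ((c :: t) ++ [b]).dropLast = c :: t
      exact List.dropLast_concat
    rw [h1, h2]

lemma alt_eq_mix : ∀ (n : Nat) (xs : List Int), xs.length ≤ n →
    ((xs.reverse.zip xs).flatMap (fun p => [p.1, p.2])).take xs.length = pvMix xs := by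
  intro n
  induction n with
  | zero =>
    intro xs h
    have : xs = [] := List.eq_nil_of_length_eq_zero (Nat.le_zero.mp h)
    simp [this, pvMix]
  | succ n ih =>
    intro xs h
    cases xs with
    | nil => simp [pvMix]
    | cons a l =>
      rcases l.eq_nil_or_concat with rfl | ⟨m, b, rfl⟩
      · simp [pvMix]
      · simp only [List.concat_eq_append] at h ⊢
        have hrev : (a :: (m ++ [b])).reverse = b :: (m.reverse ++ [a]) := by simp
        rw [hrev]
        have hlen : m.reverse.length = m.length := by simp
        have hzip : (m.reverse ++ [a]).zip (m ++ [b]) = m.reverse.zip m ++ [(a, b)] :=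
          List.zip_append hlen
        have hF : ((m.reverse.zip m).flatMap (fun p : Int × Int => [p.1, p.2])).length
            = 2 * m.length := by
          simp [List.length_flatMap, List.map_const', List.length_zip]
          omega
        simp only [List.zip_cons_cons, hzip, List.flatMap_cons, List.flatMap_append,
          List.flatMap_cons, List.flatMap_nil, List.length_cons, List.length_append,
          List.length_cons, List.length_nil]
        rw [pvMix_concat]
        have hmn : m.length ≤ n := by simp at h; omega
        have hih := ih m hmn
        simp only [List.take_succ_cons, List.cons_append, List.nil_append]
        rw [List.take_append_of_le_length (by omega)]
        rw [hih]

-- A's loop computes pvMix of the segment values[lo .. hi]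
lemma loop_eq_mix (values : List Int) :
    ∀ (k lo hi : Nat), hi + 1 - lo ≤ k → hi < values.length →
    mporderLoop values lo hi = pvMix ((values.drop lo).take (hi + 1 - lo)) := by
  intro k
  induction k with
  | zero =>
    intro lo hi hk hlt
    have hlo : ¬ lo ≤ hi := by omega
    have h0 : hi + 1 - lo = 0 := by omega
    rw [mporderLoop, dif_neg hlo, h0]
    simp [pvMix]
  | succ k ih =>
    intro lo hi hk hlt
    by_cases hle : lo ≤ hi
    · by_cases heq : hi = lo
      · subst heq
        rw [mporderLoop, dif_pos hle, dif_pos rfl]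
        have h1 : hi + 1 - hi = 1 := by omega
        rw [h1]
        have hdrop : values.drop hi = values[hi] :: values.drop (hi + 1) :=
          List.drop_eq_getElem_cons hlt
        rw [hdrop, List.take_succ_cons, List.take_zero]
        have hm1 : pvMix [values[hi]] = [values[hi]] := by simp [pvMix]
        rw [hm1]
        simp [List.getD, List.getElem?_eq_getElem hlt]
      · have hlth : lo < hi := by omega
        rw [mporderLoop, dif_pos hle, dif_neg heq]
        have hrec := ih (lo + 1) (hi - 1) (by omega) (by omega)
        rw [hrec]
        -- segment identities
        have hlolt : lo < values.length := by omega
        have hdrop : values.drop lo = values[lo] :: values.drop (lo + 1) :=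
          List.drop_eq_getElem_cons hlolt
        have hseg : hi + 1 - lo = (hi - lo) + 1 := by omega
        rw [hdrop, hseg, List.take_succ_cons]
        set T := (values.drop (lo + 1)).take (hi - lo) with hT
        have hTlen : T.length = hi - lo := by
          rw [hT, List.length_take, List.length_drop]
          omega
        have hTne : T ≠ [] := by
          intro h; rw [h] at hTlen; simp at hTlen; omega
        obtain ⟨c, t, hct⟩ := List.exists_cons_of_ne_nil hTne
        rw [hct]
        rw [pvMix]
        have hTpos : 0 < T.length := by omega
        have hq : T.getLast? = some values[hi] := by
          rw [List.getLast?_eq_getElem?, hTlen]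
          rw [List.getElem?_eq_getElem (by omega : hi - lo - 1 < T.length)]
          congr 1
          simp only [hT]
          rw [List.getElem_take, List.getElem_drop]
          congr 1
          omega
        have hlast : (c :: t).getLast (by simp) = values[hi] := by
          rw [hct] at hq
          simpa [List.getLast?_eq_some_getLast] using hq
        have hdl : (c :: t).dropLast = (values.drop (lo + 1)).take (hi - 1 + 1 - (lo + 1)) := by
          rw [← hct, List.dropLast_eq_take, hTlen, hT, List.take_take]
          congr 1
          omega
        rw [hlast, hdl]
        simp [List.getD, List.getElem?_eq_getElem hlolt, List.getElem?_eq_getElem hlt]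
    · have h0 : hi + 1 - lo = 0 := by omega
      rw [mporderLoop, dif_neg hle, h0]
      simp [pvMix]

-- ===== VERDICT (by name: the statement is the Claim_ definition above) =====
theorem mirrored_probe_order_py_spec : Claim_equal_mirrored_probe_order_py := by
  intro values _
  show mirrored_probe_order_py values = mirrored_probe_order_py_alt values
  unfold mirrored_probe_order_py mirrored_probe_order_py_alt
  by_cases hnil : values = []
  · simp [hnil]
  · rw [if_neg hnil]
    have hpos : 0 < values.length := List.length_pos_of_ne_nil hnil
    have hA := loop_eq_mix values (values.length) 0 (values.length - 1) (by omega) (by omega)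
    have hseg : values.length - 1 + 1 - 0 = values.length := by omega
    rw [hA, hseg] at *
    simp only [List.drop_zero, List.take_length]
    exact (alt_eq_mix values.length values le_rfl).symm
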